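-- pv_equiv track=rewrite | github.com/TR1GUN/rtu327-autotests | Service/Constructor_Answer.py | construct_hex_str_to_hex_list
-- ===== SOURCE A (Python) =====
-- def construct_hex_str_to_hex_list(hex_str):
--     hex_list = []
--     # пункт первый - достраиваем на один 0 если у нас нечетная длина
--     if len(hex_list) % 2 > 0:
--         hex_str = '0' + hex_str
--
--     # Теперь проходимся по каждому элементу
--     for i in range(int(len(hex_str)/2)):
--         # Теперь берем элемент
--         element = hex_str[i*2] + hex_str[(i*2)+1]
--
--         hex_list.append(element)
--     # hex_list.reverse()
--     return hex_list
-- ===== SOURCE B (Python) =====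
-- def construct_hex_str_to_hex_list(hex_str):
--     even = hex_str[0::2]
--     odd = hex_str[1::2]
--     return [a + b for a, b in zip(even, odd)]
-- ===== Notes on version B (the rewrite author's own statement) =====
-- stated objective: idiomatic
-- what changed: Replaces the index-arithmetic loop over range(len//2) by two strided slices (even/odd characters) zipped together, with zip's truncation dropping a trailing unpaired character exactly as A's range(len//2) bound does.
import Mathlib
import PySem

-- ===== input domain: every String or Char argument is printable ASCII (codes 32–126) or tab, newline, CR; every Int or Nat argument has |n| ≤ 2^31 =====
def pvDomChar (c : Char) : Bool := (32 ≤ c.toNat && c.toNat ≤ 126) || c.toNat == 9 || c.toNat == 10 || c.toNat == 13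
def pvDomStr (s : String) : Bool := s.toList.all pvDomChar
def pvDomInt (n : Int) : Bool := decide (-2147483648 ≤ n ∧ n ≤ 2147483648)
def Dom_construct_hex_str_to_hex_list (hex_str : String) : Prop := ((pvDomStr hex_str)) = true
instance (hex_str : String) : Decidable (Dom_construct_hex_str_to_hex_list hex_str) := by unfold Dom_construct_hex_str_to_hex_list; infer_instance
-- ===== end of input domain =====

-- B replaces A's index-arithmetic loop over range(len//2) by zipping the even- and odd-strided
-- slices of the string (more idiomatic; same O(n) cost; a trailing unpaired char is dropped by both).

-- ===== PORT A =====
def construct_hex_str_to_hex_list (hex_str : String) : List String :=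
  let hex_list : List String := []
  -- dead Python branch transliterated: len(hex_list) is 0 here, so 0 % 2 > 0 is false
  let hex_str := if (hex_list.length : Int) % 2 > 0 then "0" ++ hex_str else hex_str
  let cs := hex_str.toList
  (PySem.List.pyRange 0 ((cs.length : Int) / 2) 1).foldl
    (fun acc i =>
      -- element = hex_str[i*2] + hex_str[i*2+1]; both indices are always in range (i < len//2),
      -- so each pyGet? is `some` and Option.toList yields exactly that one character
      let element := String.ofList
        ((PySem.List.pyGet? cs (i * 2)).toList ++ (PySem.List.pyGet? cs (i * 2 + 1)).toList)
      acc ++ [element]) hex_list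

-- ===== PORT B =====
def construct_hex_str_to_hex_list_alt (hex_str : String) : List String :=
  let cs := hex_str.toList
  let even := (PySem.List.slice? cs (some 0) none 2).getD []   -- hex_str[0::2]; step ≠ 0, always some
  let odd  := (PySem.List.slice? cs (some 1) none 2).getD []   -- hex_str[1::2]
  List.zipWith (fun a b => String.ofList [a, b]) even odd

-- ===== PRECONDITION & SPEC =====
def Spec_construct_hex_str_to_hex_list (hex_str : String) (out : List String) : Prop := out = construct_hex_str_to_hex_list_alt hex_str
instance (hex_str : String) (out : List String) : Decidable (Spec_construct_hex_str_to_hex_list hex_str out) := by unfold Spec_construct_hex_str_to_hex_list; infer_instance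

-- ===== CLAIM (what is proved, stated in full; the proofs are below) =====
def Claim_equal_construct_hex_str_to_hex_list : Prop := ∀ (hex_str : String), Dom_construct_hex_str_to_hex_list hex_str → Spec_construct_hex_str_to_hex_list hex_str (construct_hex_str_to_hex_list hex_str)

-- ===== LEMMAS AND PROOFS =====

-- characters at even positions (hex_str[0::2]) and odd positions (hex_str[1::2])
def evens : List Char → List Char
  | a :: _ :: t => a :: evens t
  | [a] => [a]
  | [] => []

def odds : List Char → List Char
  | _ :: b :: t => b :: odds t
  | [_] => []
  | [] => []

-- consecutive character pairs, trailing unpaired character dropped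
def pairUp : List Char → List String
  | a :: b :: t => String.ofList [a, b] :: pairUp t
  | [_] => []
  | [] => []

theorem evens_spec (cs : List Char) :
    List.filterMap (fun k => cs[2*k]?) (List.range ((cs.length + 1) / 2)) = evens cs := by
  induction cs using evens.induct with
  | case1 a b t ih =>
    have h : ((a :: b :: t).length + 1) / 2 = (t.length + 1) / 2 + 1 := by simp; omega
    rw [h, List.range_succ_eq_map, List.filterMap_cons, List.filterMap_map]
    simp only [Nat.mul_zero, List.getElem?_cons_zero]
    rw [show evens (a :: b :: t) = a :: evens t from rfl, ← ih]
    refine congrArg (a :: ·) (List.filterMap_congr fun k _ => ?_)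
    simp [Function.comp, show 2 * (k + 1) = 2 * k + 1 + 1 by ring, List.getElem?_cons_succ]
  | case2 a => simp [List.range_succ, evens]
  | case3 => simp [evens]

theorem odds_spec (cs : List Char) :
    List.filterMap (fun k => cs[2*k+1]?) (List.range (cs.length / 2)) = odds cs := by
  induction cs using odds.induct with
  | case1 a b t ih =>
    have h : (a :: b :: t).length / 2 = t.length / 2 + 1 := by simp; omega
    rw [h, List.range_succ_eq_map, List.filterMap_cons, List.filterMap_map]
    simp only [Nat.mul_zero, Nat.zero_add, List.getElem?_cons_succ, List.getElem?_cons_zero]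
    rw [show odds (a :: b :: t) = b :: odds t from rfl, ← ih]
    refine congrArg (b :: ·) (List.filterMap_congr fun k _ => ?_)
    simp [Function.comp, show 2 * (k + 1) = 2 * k + 1 + 1 by ring, List.getElem?_cons_succ]
  | case2 a => simp [odds]
  | case3 => simp [odds]

theorem slice?_zero_two (cs : List Char) :
    PySem.List.slice? cs (some 0) none 2 = some (evens cs) := by
  simp only [PySem.List.slice?, PySem.List.sliceIndices]
  norm_num
  have hc : (if 0 < cs.length then (((cs.length : Int) + 2 - 1) / 2).toNat else 0)
      = (cs.length + 1) / 2 := by split_ifs with h <;> omega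
  rw [hc]
  have hf : ∀ x : Nat, ((2 : Int) * (x : Int)).toNat = 2 * x := by intro x; omega
  simp only [hf]
  exact evens_spec cs

theorem slice?_one_two (cs : List Char) :
    PySem.List.slice? cs (some 1) none 2 = some (odds cs) := by
  simp only [PySem.List.slice?, PySem.List.sliceIndices]
  norm_num
  by_cases hcs : cs = []
  · subst hcs; simp [odds]
  · have hlen : 1 ≤ cs.length := List.length_pos_of_ne_nil hcs
    have hmin : min (1 : Int) (cs.length : Int) = 1 := by omega
    rw [hmin]
    have hc : (if 1 < cs.length then (((cs.length : Int) - 1 + 2 - 1) / 2).toNat else 0)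
        = cs.length / 2 := by split_ifs with h <;> omega
    rw [hc]
    have hf : ∀ x : Nat, ((1 : Int) + 2 * (x : Int)).toNat = 2 * x + 1 := by intro x; omega
    simp only [hf]
    exact odds_spec cs

theorem mapA_pairUp (cs : List Char) :
    (List.range (cs.length / 2)).map
      (fun k => String.ofList ((cs[2*k]?).toList ++ (cs[2*k+1]?).toList)) = pairUp cs := by
  induction cs using pairUp.induct with
  | case1 a b t ih =>
    have h : (a :: b :: t).length / 2 = t.length / 2 + 1 := by simp; omega
    rw [h, List.range_succ_eq_map, List.map_cons, List.map_map]
    simp only [Nat.mul_zero, Nat.zero_add, List.getElem?_cons_zero, List.getElem?_cons_succ]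
    rw [show pairUp (a :: b :: t) = String.ofList [a, b] :: pairUp t from rfl, ← ih]
    refine congrArg (_ :: ·) (List.map_congr_left fun k _ => ?_)
    simp [Function.comp, show 2 * (k + 1) = 2 * k + 1 + 1 by ring, List.getElem?_cons_succ]
  | case2 a => simp [pairUp]
  | case3 => simp [pairUp]

theorem zip_pairUp (cs : List Char) :
    List.zipWith (fun a b => String.ofList [a, b]) (evens cs) (odds cs) = pairUp cs := by
  induction cs using pairUp.induct with
  | case1 a b t ih => simp [evens, odds, pairUp, ih]
  | case2 a => simp [evens, odds, pairUp]
  | case3 => simp [evens, odds, pairUp]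

theorem portA_eq_pairUp (hex_str : String) :
    construct_hex_str_to_hex_list hex_str = pairUp hex_str.toList := by
  unfold construct_hex_str_to_hex_list
  simp only [List.length_nil]
  rw [if_neg (by decide)]
  rw [PySem.List.foldl_append_singleton_eq_map, PySem.List.pyRange_one]
  have hn : (((hex_str.toList.length : Int) / 2) - 0).toNat = hex_str.toList.length / 2 := by omega
  rw [hn, List.map_map]
  rw [← mapA_pairUp hex_str.toList]
  simp only [List.nil_append]
  refine List.map_congr_left fun k _ => ?_
  simp only [Function.comp_apply]
  rw [show ((0 : Int) + (k : Int)) * 2 = ((2 * k : Nat) : Int) by push_cast; ring,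
      show ((2 * k : Nat) : Int) + 1 = ((2 * k + 1 : Nat) : Int) by push_cast; ring,
      PySem.List.pyGet?_natCast, PySem.List.pyGet?_natCast]

theorem portB_eq_pairUp (hex_str : String) :
    construct_hex_str_to_hex_list_alt hex_str = pairUp hex_str.toList := by
  simp only [construct_hex_str_to_hex_list_alt, slice?_zero_two, slice?_one_two,
    Option.getD_some]
  exact zip_pairUp hex_str.toList

-- ===== VERDICT (by name: the statement is the Claim_ definition above) =====
theorem construct_hex_str_to_hex_list_spec : Claim_equal_construct_hex_str_to_hex_list := by
  intro hex_str _
  unfold Spec_construct_hex_str_to_hex_list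
  rw [portA_eq_pairUp, portB_eq_pairUp]
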